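-- pv_equiv track=rewrite | github.com/priyathg45/Test-Gen-ChatBot | User/backend/src/chatbot/chatbot.py | _build_smalltalk_response
-- ===== SOURCE A (Python) =====
-- def _build_smalltalk_response(text: str) -> str:
--     """Return a friendly smalltalk response."""
--     if "how are you" in text:
--         return "I'm doing well—ready to help. Ask me anything about aluminum products or materials." \
--                " If you'd like, I can also suggest a random product."
--     if any(k in text for k in ["bye", "goodbye", "see you"]):
--         return "Goodbye! If you have more questions about aluminum products, just ask anytime."
--     if any(k in text for k in ["thanks", "thank you"]):
--         return "You're welcome! Want details on a specific aluminum alloy or application?"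
--     if any(k in text for k in ["who are you", "what can you do", "help"]):
--         return (
--             "I'm your aluminum products chatbot. I can answer product questions, compare alloys, "
--             "suggest applications, and show prices/specs. You can also ask for a random product."
--         )
--     return "Hello! I’m here to help. Ask about aluminum products, or say 'random' for a surprise pick."
-- ===== SOURCE B (Python) =====
-- # Single left-to-right scan of the text: at each position take the priority of
-- # the highest-priority keyword starting there, keep the minimum, and map the
-- # best priority found to its response.  (text-driven scan instead of A's
-- # per-rule substring tests)
--
-- KEYWORDS = [
--     ("how are you", 0),
--     ("bye", 1), ("goodbye", 1), ("see you", 1),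
--     ("thanks", 2), ("thank you", 2),
--     ("who are you", 3), ("what can you do", 3), ("help", 3),
-- ]
--
-- RESPONSES = [
--     "I'm doing well\u2014ready to help. Ask me anything about aluminum products or materials."
--     " If you'd like, I can also suggest a random product.",
--     "Goodbye! If you have more questions about aluminum products, just ask anytime.",
--     "You're welcome! Want details on a specific aluminum alloy or application?",
--     "I'm your aluminum products chatbot. I can answer product questions, compare alloys, "
--     "suggest applications, and show prices/specs. You can also ask for a random product.",
--     "Hello! I\u2019m here to help. Ask about aluminum products, or say 'random' for a surprise pick.",
-- ]
--
--
-- def _prio_at(text, i):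
--     """Priority of the best (first-listed) keyword starting at position i, else 4."""
--     for kw, p in KEYWORDS:
--         if text.startswith(kw, i):
--             return p
--     return 4
--
--
-- def _build_smalltalk_response(text: str) -> str:
--     """Return a friendly smalltalk response (single scan over text positions)."""
--     best = 4
--     for i in range(len(text)):
--         best = min(best, _prio_at(text, i))
--     return RESPONSES[best]
-- ===== Notes on version B (the rewrite author's own statement) =====
-- stated objective: alternative
-- what changed: Replaces A's ordered per-rule substring tests ('kw in text' chain) with a single left-to-right scan over text positions that keeps the minimum priority of any keyword starting at each position, then indexes a response table with the best priority.
import Mathlib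
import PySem

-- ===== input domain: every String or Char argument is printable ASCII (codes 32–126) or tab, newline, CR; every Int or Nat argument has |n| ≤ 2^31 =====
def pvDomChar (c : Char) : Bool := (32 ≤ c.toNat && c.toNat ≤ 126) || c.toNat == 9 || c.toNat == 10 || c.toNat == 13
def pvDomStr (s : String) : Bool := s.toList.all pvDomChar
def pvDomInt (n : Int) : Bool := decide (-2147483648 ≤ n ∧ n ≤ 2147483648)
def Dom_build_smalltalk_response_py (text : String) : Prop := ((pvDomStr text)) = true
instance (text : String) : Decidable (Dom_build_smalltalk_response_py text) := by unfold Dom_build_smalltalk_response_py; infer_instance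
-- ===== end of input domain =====

-- B replaces A's per-rule substring tests by one left-to-right scan over text positions
-- that keeps the minimum priority of any keyword starting at each position (alternative; same cost).

-- ===== PORT A =====
def build_smalltalk_response_py (text : String) : String :=
  if PySem.Str.isIn "how are you" text then
    "I'm doing well—ready to help. Ask me anything about aluminum products or materials. If you'd like, I can also suggest a random product."
  else if ["bye", "goodbye", "see you"].any (fun k => PySem.Str.isIn k text) then
    "Goodbye! If you have more questions about aluminum products, just ask anytime."
  else if ["thanks", "thank you"].any (fun k => PySem.Str.isIn k text) then
    "You're welcome! Want details on a specific aluminum alloy or application?"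
  else if ["who are you", "what can you do", "help"].any (fun k => PySem.Str.isIn k text) then
    "I'm your aluminum products chatbot. I can answer product questions, compare alloys, suggest applications, and show prices/specs. You can also ask for a random product."
  else
    "Hello! I’m here to help. Ask about aluminum products, or say 'random' for a surprise pick."

-- ===== PORT B =====
def pvKeywords : List (List Char × Nat) :=
  [("how are you".toList, 0),
   ("bye".toList, 1), ("goodbye".toList, 1), ("see you".toList, 1),
   ("thanks".toList, 2), ("thank you".toList, 2),
   ("who are you".toList, 3), ("what can you do".toList, 3), ("help".toList, 3)]

def pvResponses : List String :=
  ["I'm doing well—ready to help. Ask me anything about aluminum products or materials. If you'd like, I can also suggest a random product.",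
   "Goodbye! If you have more questions about aluminum products, just ask anytime.",
   "You're welcome! Want details on a specific aluminum alloy or application?",
   "I'm your aluminum products chatbot. I can answer product questions, compare alloys, suggest applications, and show prices/specs. You can also ask for a random product.",
   "Hello! I’m here to help. Ask about aluminum products, or say 'random' for a surprise pick."]

-- priority of the first-listed keyword starting at the head of s, else 4  (Source B's _prio_at on the suffix)
def pvPrioAt (kws : List (List Char × Nat)) (s : List Char) : Nat :=
  match kws with
  | [] => 4
  | (kw, p) :: rest => if PySem.Chars.startswith s kw then p else pvPrioAt rest s

-- the scan over positions (suffixes), accumulating the best (minimal) priority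
def pvScan : List Char → Nat → Nat
  | [], b => b
  | c :: rest, b => pvScan rest (min b (pvPrioAt pvKeywords (c :: rest)))

def build_smalltalk_response_py_alt (text : String) : String :=
  pvResponses.getD (pvScan text.toList 4) ""

-- ===== PRECONDITION & SPEC =====
def Spec_build_smalltalk_response_py (text : String) (out : String) : Prop := out = build_smalltalk_response_py_alt text
instance (text : String) (out : String) : Decidable (Spec_build_smalltalk_response_py text out) := by unfold Spec_build_smalltalk_response_py; infer_instance

-- ===== CLAIM (what is proved, stated in full; the proofs are below) =====
def Claim_equal_build_smalltalk_response_py : Prop := ∀ (text : String), Dom_build_smalltalk_response_py text → Spec_build_smalltalk_response_py text (build_smalltalk_response_py text)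

-- ===== LEMMAS AND PROOFS =====

theorem pvScan_le_init : ∀ (s : List Char) (b : Nat), pvScan s b ≤ b := by
  intro s
  induction s with
  | nil => intro b; simp [pvScan]
  | cons c rest ih =>
      intro b
      calc pvScan (c :: rest) b = pvScan rest (min b (pvPrioAt pvKeywords (c :: rest))) := rfl
        _ ≤ min b (pvPrioAt pvKeywords (c :: rest)) := ih _
        _ ≤ b := min_le_left _ _

theorem pvScan_le_drop : ∀ (s : List Char) (b j : Nat), j < s.length →
    pvScan s b ≤ pvPrioAt pvKeywords (s.drop j) := by
  intro s
  induction s with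
  | nil => intro b j h; simp at h
  | cons c rest ih =>
      intro b j h
      match j with
      | 0 =>
          rw [show pvScan (c :: rest) b
                = pvScan rest (min b (pvPrioAt pvKeywords (c :: rest))) from rfl]
          exact le_trans (pvScan_le_init _ _) (by simp)
      | j + 1 =>
          simp only [List.drop_succ_cons]
          exact ih _ j (by simpa using h)

theorem pvScan_ge : ∀ (s : List Char) (b p : Nat), p ≤ b →
    (∀ j, p ≤ pvPrioAt pvKeywords (s.drop j)) → p ≤ pvScan s b := by
  intro s
  induction s with
  | nil => intro b p hb _; simpa [pvScan] using hb
  | cons c rest ih =>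
      intro b p hb hall
      refine ih _ p (le_min hb ?_) (fun j => by simpa using hall (j + 1))
      simpa using hall 0

-- a matching keyword bounds pvPrioAt from above
theorem pvPrioAt_le (s : List Char) (kw : List Char) (p : Nat)
    (hm : (kw, p) ∈ pvKeywords) (hs : PySem.Chars.startswith s kw = true) :
    pvPrioAt pvKeywords s ≤ p := by
  fin_cases hm <;> (simp only [pvKeywords, pvPrioAt]; split_ifs <;> simp_all)

-- pvPrioAt is ≥ p when no keyword of priority < p starts at s
theorem pvPrioAt_ge (s : List Char) (p : Nat)
    (h : ∀ kw q, (kw, q) ∈ pvKeywords → q < p → PySem.Chars.startswith s kw = false) :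
    p ≤ pvPrioAt pvKeywords s ∨ 4 ≤ p := by
  by_cases hp : 4 ≤ p
  · exact Or.inr hp
  · left
    have h0 := h "how are you".toList 0 (by simp [pvKeywords])
    have h1 := h "bye".toList 1 (by simp [pvKeywords])
    have h2 := h "goodbye".toList 1 (by simp [pvKeywords])
    have h3 := h "see you".toList 1 (by simp [pvKeywords])
    have h4 := h "thanks".toList 2 (by simp [pvKeywords])
    have h5 := h "thank you".toList 2 (by simp [pvKeywords])
    have h6 := h "who are you".toList 3 (by simp [pvKeywords])
    have h7 := h "what can you do".toList 3 (by simp [pvKeywords])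
    have h8 := h "help".toList 3 (by simp [pvKeywords])
    simp only [pvKeywords, pvPrioAt]
    split_ifs <;> simp_all
    all_goals omega

-- Str.isIn true gives a position j < length where the keyword starts
theorem exists_pos_of_isIn (kw s : List Char) (hne : kw ≠ [])
    (h : PySem.Chars.isIn kw s = true) :
    ∃ j, j < s.length ∧ PySem.Chars.startswith (s.drop j) kw = true := by
  obtain ⟨j, hj⟩ := (PySem.Chars.exists_prefix_drop_iff_isIn kw s).mpr h
  refine ⟨j, ?_, (PySem.Chars.startswith_iff _ _).mpr hj⟩
  by_contra hlt
  have : s.drop j = [] := List.drop_eq_nil_of_le (by omega)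
  rw [this] at hj
  exact hne (List.prefix_nil.mp hj)

theorem not_start_of_not_isIn (kw s : List Char)
    (h : PySem.Chars.isIn kw s = false) :
    ∀ j, PySem.Chars.startswith (s.drop j) kw = false := by
  intro j
  by_contra hb
  rw [Bool.not_eq_false, PySem.Chars.startswith_iff] at hb
  have : PySem.Chars.isIn kw s = true :=
    (PySem.Chars.exists_prefix_drop_iff_isIn kw s).mp ⟨j, hb⟩
  simp [this] at h

-- pvScan s 4 ≤ p whenever some keyword of priority p occurs in s
theorem pvScan_le_of_isIn (s kw : List Char) (p : Nat) (hne : kw ≠ [])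
    (hm : (kw, p) ∈ pvKeywords) (h : PySem.Chars.isIn kw s = true) :
    pvScan s 4 ≤ p := by
  obtain ⟨j, hj, hstart⟩ := exists_pos_of_isIn kw s hne h
  calc pvScan s 4 ≤ pvPrioAt pvKeywords (s.drop j) := pvScan_le_drop s 4 j hj
    _ ≤ p := pvPrioAt_le _ kw p hm hstart

-- p ≤ pvScan s 4 whenever no keyword of priority < p occurs in s (p ≤ 4)
theorem pvScan_ge_of_not_isIn (s : List Char) (p : Nat) (hp : p ≤ 4)
    (h : ∀ kw q, (kw, q) ∈ pvKeywords → q < p → PySem.Chars.isIn kw s = false) :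
    p ≤ pvScan s 4 := by
  refine pvScan_ge s 4 p hp (fun j => ?_)
  rcases pvPrioAt_ge (s.drop j) p
      (fun kw q hm hq => not_start_of_not_isIn kw s (h kw q hm hq) j) with h' | h'
  · exact h'
  · -- p = 4; pvPrioAt ∈ {0,…,4} but all keywords absent: pvPrioAt (drop j) = 4
    have h0 := not_start_of_not_isIn _ s (h "how are you".toList 0 (by simp [pvKeywords]) (by omega)) j
    have h1 := not_start_of_not_isIn _ s (h "bye".toList 1 (by simp [pvKeywords]) (by omega)) j
    have h2 := not_start_of_not_isIn _ s (h "goodbye".toList 1 (by simp [pvKeywords]) (by omega)) j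
    have h3 := not_start_of_not_isIn _ s (h "see you".toList 1 (by simp [pvKeywords]) (by omega)) j
    have h4 := not_start_of_not_isIn _ s (h "thanks".toList 2 (by simp [pvKeywords]) (by omega)) j
    have h5 := not_start_of_not_isIn _ s (h "thank you".toList 2 (by simp [pvKeywords]) (by omega)) j
    have h6 := not_start_of_not_isIn _ s (h "who are you".toList 3 (by simp [pvKeywords]) (by omega)) j
    have h7 := not_start_of_not_isIn _ s (h "what can you do".toList 3 (by simp [pvKeywords]) (by omega)) j
    have h8 := not_start_of_not_isIn _ s (h "help".toList 3 (by simp [pvKeywords]) (by omega)) j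
    have : pvPrioAt pvKeywords (s.drop j) = 4 := by
      simp only [pvKeywords, pvPrioAt]
      rw [h0, h1, h2, h3, h4, h5, h6, h7, h8]
      simp
    omega

-- ===== VERDICT (by name: the statement is the Claim_ definition above) =====
theorem build_smalltalk_response_py_spec : Claim_equal_build_smalltalk_response_py := by
  intro text _
  unfold Spec_build_smalltalk_response_py build_smalltalk_response_py build_smalltalk_response_py_alt
  simp only [PySem.Str.isIn_eq, List.any_cons, List.any_nil, Bool.or_false]
  set s := text.toList with hs
  by_cases h0 : PySem.Chars.isIn "how are you".toList s = true
  · have hM : pvScan s 4 = 0 :=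
      Nat.le_antisymm (pvScan_le_of_isIn s _ 0 (by decide) (by simp [pvKeywords]) h0) (Nat.zero_le _)
    simp_all [pvResponses]
  · have h0' : PySem.Chars.isIn "how are you".toList s = false := by simpa using h0
    by_cases hg1 : (PySem.Chars.isIn "bye".toList s || PySem.Chars.isIn "goodbye".toList s
        || PySem.Chars.isIn "see you".toList s) = true
    · have hle : pvScan s 4 ≤ 1 := by
        rcases Bool.or_eq_true_iff.mp hg1 with hg | hg
        · rcases Bool.or_eq_true_iff.mp hg with hg' | hg'
          · exact pvScan_le_of_isIn s _ 1 (by decide) (by simp [pvKeywords]) hg'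
          · exact pvScan_le_of_isIn s _ 1 (by decide) (by simp [pvKeywords]) hg'
        · exact pvScan_le_of_isIn s _ 1 (by decide) (by simp [pvKeywords]) hg
      have hge : 1 ≤ pvScan s 4 := by
        refine pvScan_ge_of_not_isIn s 1 (by omega) (fun kw q hm hq => ?_)
        fin_cases hm <;> simp_all
      have hM : pvScan s 4 = 1 := by omega
      simp_all [pvResponses]
      intro hx1 hx2 hx3
      simp [hx1, hx2, hx3] at hg1
    · simp only [Bool.or_eq_true, not_or, Bool.not_eq_true] at hg1
      obtain ⟨⟨hb, hgb⟩, hsy⟩ := hg1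
      by_cases hg2 : (PySem.Chars.isIn "thanks".toList s
          || PySem.Chars.isIn "thank you".toList s) = true
      · have hle : pvScan s 4 ≤ 2 := by
          rcases Bool.or_eq_true_iff.mp hg2 with hg | hg
          · exact pvScan_le_of_isIn s _ 2 (by decide) (by simp [pvKeywords]) hg
          · exact pvScan_le_of_isIn s _ 2 (by decide) (by simp [pvKeywords]) hg
        have hge : 2 ≤ pvScan s 4 := by
          refine pvScan_ge_of_not_isIn s 2 (by omega) (fun kw q hm hq => ?_)
          fin_cases hm <;> simp_all
        have hM : pvScan s 4 = 2 := by omega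
        simp_all [pvResponses]
      · simp only [Bool.or_eq_true, not_or, Bool.not_eq_true] at hg2
        obtain ⟨ht1, ht2⟩ := hg2
        by_cases hg3 : (PySem.Chars.isIn "who are you".toList s
            || PySem.Chars.isIn "what can you do".toList s
            || PySem.Chars.isIn "help".toList s) = true
        · have hle : pvScan s 4 ≤ 3 := by
            rcases Bool.or_eq_true_iff.mp hg3 with hg | hg
            · rcases Bool.or_eq_true_iff.mp hg with hg' | hg'
              · exact pvScan_le_of_isIn s _ 3 (by decide) (by simp [pvKeywords]) hg'
              · exact pvScan_le_of_isIn s _ 3 (by decide) (by simp [pvKeywords]) hg'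
            · exact pvScan_le_of_isIn s _ 3 (by decide) (by simp [pvKeywords]) hg
          have hge : 3 ≤ pvScan s 4 := by
            refine pvScan_ge_of_not_isIn s 3 (by omega) (fun kw q hm hq => ?_)
            fin_cases hm <;> simp_all
          have hM : pvScan s 4 = 3 := by omega
          simp_all [pvResponses]
          intro hx1 hx2
          simp [hx1, hx2] at hg3
          exact hg3
        · simp only [Bool.or_eq_true, not_or, Bool.not_eq_true] at hg3
          obtain ⟨⟨hw1, hw2⟩, hw3⟩ := hg3
          have hge : 4 ≤ pvScan s 4 := by
            refine pvScan_ge_of_not_isIn s 4 (by omega) (fun kw q hm hq => ?_)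
            fin_cases hm <;> simp_all
          have hM : pvScan s 4 = 4 := Nat.le_antisymm (pvScan_le_init s 4) hge
          simp_all [pvResponses]
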